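-- pv_equiv track=rewrite | github.com/vinicius945/take | trash.py | verificar_respostas
-- ===== SOURCE A (Python) =====
-- def verificar_respostas(respostas):
--     respostas_corretas = [
--         "papel",
--         ["amarela", "amarelo"],
--         "vidro",
--         ["vermelha", "vermelho"]
--     ]
--     for i in range(4):
--         if isinstance(respostas_corretas[i], list):
--             if respostas[i] not in respostas_corretas[i]:
--                 return False
--         else:
--             if respostas[i] != respostas_corretas[i]:
--                 return False
--     return True
-- ===== SOURCE B (Python) =====
-- def verificar_respostas(respostas):
--     canon = {"amarelo": "amarela", "vermelho": "vermelha"}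
--     return [canon.get(r, r) for r in respostas[:4]] == ["papel", "amarela", "vidro", "vermelha"]
-- ===== Notes on version B (the rewrite author's own statement) =====
-- stated objective: alternative
-- what changed: B canonicalizes the first four answers through a synonym dictionary (amarelo->amarela, vermelho->vermelha) and then compares the whole normalized list to the single correct tuple by one list equality, instead of A's per-index loop with an isinstance branch and early returns.
import Mathlib
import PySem

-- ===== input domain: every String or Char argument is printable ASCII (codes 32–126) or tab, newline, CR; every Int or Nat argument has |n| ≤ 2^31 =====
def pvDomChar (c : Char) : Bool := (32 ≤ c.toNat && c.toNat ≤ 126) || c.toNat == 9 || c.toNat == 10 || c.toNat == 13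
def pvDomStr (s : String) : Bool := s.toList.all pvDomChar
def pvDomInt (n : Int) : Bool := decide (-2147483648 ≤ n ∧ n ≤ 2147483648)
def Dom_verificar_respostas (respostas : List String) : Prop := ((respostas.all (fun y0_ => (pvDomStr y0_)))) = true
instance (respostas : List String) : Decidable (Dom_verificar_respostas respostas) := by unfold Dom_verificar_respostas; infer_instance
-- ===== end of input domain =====

-- B canonicalizes the first four answers through a synonym dictionary and compares the whole
-- normalized list to the single correct tuple by one equality, instead of A's per-index
-- branching loop with early returns (objective: alternative decomposition, same cost).

-- ===== PORT A =====
-- Heterogeneous entries of respostas_corretas: a bare string or a list of strings.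
inductive AnsA where
  | str : String → AnsA
  | lst : List String → AnsA
deriving Repr, DecidableEq

def respostasCorretasA : List AnsA :=
  [AnsA.str "papel", AnsA.lst ["amarela", "amarelo"], AnsA.str "vidro",
   AnsA.lst ["vermelha", "vermelho"]]

-- the 'for i in range(4)' loop with early returns; respostas[i] is pyGet? — the
-- 'getD ""' default is never reached under Pre_ (Python raises IndexError there).
def aLoop (respostas : List String) : List Int → Bool
  | [] => true
  | i :: rest =>
    match (PySem.List.pyGet? respostasCorretasA i).getD (AnsA.str "") with
    | AnsA.lst l =>
      if ((PySem.List.pyGet? respostas i).getD "") ∈ l then aLoop respostas rest else false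
    | AnsA.str s =>
      if ((PySem.List.pyGet? respostas i).getD "") ≠ s then false else aLoop respostas rest

def verificar_respostas (respostas : List String) : Bool :=
  aLoop respostas (PySem.List.pyRange 0 4 1)

-- ===== PORT B =====
-- canon = {"amarelo": "amarela", "vermelho": "vermelha"}
def canonB : PySem.Dict String String :=
  PySem.Dict.ofList [("amarelo", "amarela"), ("vermelho", "vermelha")]

-- [canon.get(r, r) for r in respostas[:4]] == ["papel", "amarela", "vidro", "vermelha"]
def verificar_respostas_alt (respostas : List String) : Bool :=
  ((PySem.List.slice respostas none (some 4)).map (fun r => PySem.Dict.getD canonB r r))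
    == ["papel", "amarela", "vidro", "vermelha"]

-- ===== PRECONDITION & SPEC =====
-- acceptable answers for index i, used only by Pre_/Raises_ (independent of both ports)
def preOkAt (i : Nat) (s : String) : Bool :=
  match i with
  | 0 => s == "papel"
  | 1 => s == "amarela" || s == "amarelo"
  | 2 => s == "vidro"
  | 3 => s == "vermelha" || s == "vermelho"
  | _ => true

-- A raises IndexError exactly when fewer than 4 answers are given and every given
-- answer is correct; Pre_ admits all other inputs (where A returns).
def Pre_verificar_respostas (respostas : List String) : Prop :=
  4 ≤ respostas.length ∨
    ((respostas.take 4).zipIdx.any (fun p => !preOkAt p.2 p.1)) = true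
instance (respostas : List String) : Decidable (Pre_verificar_respostas respostas) := by
  unfold Pre_verificar_respostas; infer_instance

def pvWitness_verificar_respostas : List String := ["papel", "amarela", "vidro", "vermelha"]

def Spec_verificar_respostas (respostas : List String) (out : Bool) : Prop :=
  out = verificar_respostas_alt respostas
instance (respostas : List String) (out : Bool) :
    Decidable (Spec_verificar_respostas respostas out) := by
  unfold Spec_verificar_respostas; infer_instance

-- ===== CLAIM (what is proved, stated in full; the proofs are below) =====
def Claim_equal_verificar_respostas : Prop :=
  ∀ (respostas : List String), Dom_verificar_respostas respostas →
    Pre_verificar_respostas respostas →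
      Spec_verificar_respostas respostas (verificar_respostas respostas)

-- ===== LEMMAS AND PROOFS =====

theorem gp (x0 x1 x2 x3 : String) (t : List String) :
    (PySem.List.pyGet? (x0::x1::x2::x3::t) 0 = some x0) ∧
    (PySem.List.pyGet? (x0::x1::x2::x3::t) 1 = some x1) ∧
    (PySem.List.pyGet? (x0::x1::x2::x3::t) 2 = some x2) ∧
    (PySem.List.pyGet? (x0::x1::x2::x3::t) 3 = some x3) := by
  refine ⟨?_, ?_, ?_, ?_⟩ <;> simp [PySem.List.pyGet?, PySem.List.pyIdx?] <;> rw [if_pos (by omega)] <;> simp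

theorem sliceTake4 (xs : List String) :
    PySem.List.slice xs none (some 4) = xs.take 4 := by
  have : ((4 : Int)) = ((4 : Nat) : Int) := by norm_num
  rw [this, PySem.List.slice_to_natCast]

theorem canonB_mk : canonB = PySem.Dict.mk [("amarelo", "amarela"), ("vermelho", "vermelha")] := by decide

theorem canonEval (s : String) :
    PySem.Dict.getD canonB s s =
      if s = "amarelo" then "amarela" else if s = "vermelho" then "vermelha" else s := by
  rw [PySem.Dict.getD_eq_get?_getD, canonB_mk]
  by_cases h1 : s = "amarelo"
  · subst h1; decide
  · by_cases h2 : s = "vermelho"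
    · subst h2; decide
    · simp [PySem.Dict.get?, h1, h2, Ne.symm h1, Ne.symm h2]

theorem cn_papel (s : String) :
    ((if s = "amarelo" then "amarela" else if s = "vermelho" then "vermelha" else s) == "papel")
      = decide (s = "papel") := by split_ifs <;> simp [Bool.beq_eq_decide_eq, *]

theorem cn_amarela (s : String) :
    ((if s = "amarelo" then "amarela" else if s = "vermelho" then "vermelha" else s) == "amarela")
      = (decide (s = "amarela") || decide (s = "amarelo")) := by split_ifs <;> simp [Bool.beq_eq_decide_eq, *]

theorem cn_vidro (s : String) :
    ((if s = "amarelo" then "amarela" else if s = "vermelho" then "vermelha" else s) == "vidro")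
      = decide (s = "vidro") := by split_ifs <;> simp [Bool.beq_eq_decide_eq, *]

theorem cn_vermelha (s : String) :
    ((if s = "amarelo" then "amarela" else if s = "vermelho" then "vermelha" else s) == "vermelha")
      = (decide (s = "vermelha") || decide (s = "vermelho")) := by split_ifs <;> simp [Bool.beq_eq_decide_eq, *]

-- B's value on a list of at least four answers, as plain string equalities
theorem altChar (a b c d : String) (t : List String) :
    verificar_respostas_alt (a::b::c::d::t) =
      (decide (a = "papel") && (decide (b = "amarela") || decide (b = "amarelo")) &&
        decide (c = "vidro") && (decide (d = "vermelha") || decide (d = "vermelho"))) := by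
  simp only [verificar_respostas_alt, sliceTake4, List.take_succ_cons, List.take_zero,
    List.map_cons, List.map_nil, canonEval]
  simp [cn_papel, cn_amarela, cn_vidro, cn_vermelha, Bool.and_assoc]

-- ===== VERDICT (by name: the statement is the Claim_ definition above) =====
theorem verificar_respostas_spec : Claim_equal_verificar_respostas := by
  unfold Claim_equal_verificar_respostas Spec_verificar_respostas
  have hr : PySem.List.pyRange 0 4 1 = [0,1,2,3] := by decide
  intro r _dom pre
  match r with
  | a :: b :: c :: d :: t =>
    obtain ⟨h0, h1, h2, h3⟩ := gp a b c d t
    have c0 : PySem.List.pyGet? respostasCorretasA 0 = some (AnsA.str "papel") := by decide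
    have c1 : PySem.List.pyGet? respostasCorretasA 1 = some (AnsA.lst ["amarela", "amarelo"]) := by decide
    have c2 : PySem.List.pyGet? respostasCorretasA 2 = some (AnsA.str "vidro") := by decide
    have c3 : PySem.List.pyGet? respostasCorretasA 3 = some (AnsA.lst ["vermelha", "vermelho"]) := by decide
    simp only [verificar_respostas, hr, aLoop, h0, h1, h2, h3, c0, c1, c2, c3,
      Option.getD_some, altChar]
    by_cases ha : a = "papel" <;> by_cases hb : b = "amarela" <;> by_cases hb' : b = "amarelo" <;>
      by_cases hc : c = "vidro" <;> by_cases hd : d = "vermelha" <;> by_cases hd' : d = "vermelho" <;>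
      simp [ha, hb, hb', hc, hd, hd']
  | [] => simp [Pre_verificar_respostas] at pre
  | [a] =>
    simp [Pre_verificar_respostas, preOkAt] at pre
    simp [verificar_respostas, verificar_respostas_alt, hr, aLoop, respostasCorretasA,
      PySem.List.pyGet?, PySem.List.pyIdx?, sliceTake4, pre]
  | [a,b] =>
    simp [Pre_verificar_respostas, preOkAt] at pre
    by_cases ha : a = "papel" <;> by_cases hb : b = "amarela" <;> by_cases hb' : b = "amarelo" <;>
      simp [verificar_respostas, verificar_respostas_alt, hr, aLoop, respostasCorretasA,
        PySem.List.pyGet?, PySem.List.pyIdx?, sliceTake4, canonEval, ha, hb, hb']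
  | [a,b,c] =>
    simp [Pre_verificar_respostas, preOkAt] at pre
    by_cases ha : a = "papel" <;> by_cases hb : b = "amarela" <;> by_cases hb' : b = "amarelo" <;>
      by_cases hc : c = "vidro" <;>
      simp [verificar_respostas, verificar_respostas_alt, hr, aLoop, respostasCorretasA,
        PySem.List.pyGet?, PySem.List.pyIdx?, sliceTake4, canonEval, ha, hb, hb', hc]
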